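-- pv_equiv track=rewrite | github.com/Jeongseulho/CSstudy | seulho/크레인_인형뽑기.py | countDelDoll
-- ===== SOURCE A (Python) =====
-- def countDelDoll(basket_stack):
--     cnt = 0
--     while True:
--         if len(basket_stack) < 2 or basket_stack[-1] != basket_stack[-2]:
--             return cnt
--         basket_stack.pop()
--         basket_stack.pop()
--         cnt += 2
-- ===== SOURCE B (Python) =====
-- def countDelDoll(basket_stack):
--     # Count matched trailing pairs first, then delete them in one bulk operation.
--     cnt = 0
--     i = len(basket_stack) - 1
--     while i >= 1 and basket_stack[i] == basket_stack[i - 1]: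
--         cnt += 2
--         i -= 2
--     del basket_stack[len(basket_stack) - cnt:]
--     return cnt
-- ===== Notes on version B (the rewrite author's own statement) =====
-- stated objective: alternative
-- what changed: Separates counting from mutation: an index scan from the top counts matched trailing pairs, then one bulk slice deletion removes them, instead of popping two elements per loop iteration.
import Mathlib
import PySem

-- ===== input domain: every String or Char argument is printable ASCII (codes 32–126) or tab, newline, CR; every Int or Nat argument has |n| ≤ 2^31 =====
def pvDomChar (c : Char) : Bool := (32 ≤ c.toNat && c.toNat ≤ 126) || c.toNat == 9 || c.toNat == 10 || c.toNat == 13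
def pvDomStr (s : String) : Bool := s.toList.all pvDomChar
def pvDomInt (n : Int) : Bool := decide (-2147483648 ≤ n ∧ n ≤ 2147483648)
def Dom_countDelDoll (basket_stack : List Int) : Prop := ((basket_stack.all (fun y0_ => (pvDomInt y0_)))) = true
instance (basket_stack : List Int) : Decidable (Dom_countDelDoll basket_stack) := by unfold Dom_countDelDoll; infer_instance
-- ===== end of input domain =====

-- B changes the decomposition (count trailing pairs by index scan, then one bulk deletion)
-- instead of A's pop-two-per-iteration loop; A mutates its argument and B performs the same
-- mutation in Python — the equivalence proved here is about the RETURN value.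

-- ===== PORT A =====
-- A's while loop: if len < 2 or last ≠ second-last return cnt; else pop twice, cnt += 2.
def countDelDollLoop (bs : List Int) (cnt : Int) : Int :=
  if _h : bs.length < 2 ∨ PySem.List.pyGet? bs (-1) ≠ PySem.List.pyGet? bs (-2) then cnt
  else countDelDollLoop bs.dropLast.dropLast (cnt + 2)
termination_by bs.length
decreasing_by
  simp only [List.length_dropLast]; omega

def countDelDoll (basket_stack : List Int) : Int :=
  countDelDollLoop basket_stack 0

-- ===== PORT B =====
-- B's index scan: while i >= 1 and bs[i] == bs[i-1]: cnt += 2; i -= 2.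
-- (B's bulk deletion mutates the Python list; the returned value is cnt.)
def countDelDollScan (bs : List Int) (i : Int) (cnt : Int) : Int :=
  if _h : 1 ≤ i ∧ PySem.List.pyGet? bs i = PySem.List.pyGet? bs (i - 1) then
    countDelDollScan bs (i - 2) (cnt + 2)
  else cnt
termination_by i.toNat
decreasing_by
  omega

def countDelDoll_alt (basket_stack : List Int) : Int :=
  countDelDollScan basket_stack ((basket_stack.length : Int) - 1) 0

-- ===== PRECONDITION & SPEC =====
def Spec_countDelDoll (basket_stack : List Int) (out : Int) : Prop := out = countDelDoll_alt basket_stack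
instance (basket_stack : List Int) (out : Int) : Decidable (Spec_countDelDoll basket_stack out) := by unfold Spec_countDelDoll; infer_instance

-- ===== CLAIM (what is proved, stated in full; the proofs are below) =====
def Claim_equal_countDelDoll : Prop := ∀ (basket_stack : List Int), Dom_countDelDoll basket_stack → Spec_countDelDoll basket_stack (countDelDoll basket_stack)

-- ===== LEMMAS AND PROOFS =====

-- The scan only reads indices ≤ i, so trailing elements beyond i do not matter.
theorem countDelDollScan_append (ys tail : List Int) (i cnt : Int)
    (hi : i < (ys.length : Int)) :
    countDelDollScan (ys ++ tail) i cnt = countDelDollScan ys i cnt := by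
  have hget : ∀ j : Int, 0 ≤ j → j < (ys.length : Int) →
      PySem.List.pyGet? (ys ++ tail) j = PySem.List.pyGet? ys j := by
    intro j hj0 hjl
    rw [PySem.List.pyGet?_of_nonneg _ hj0, PySem.List.pyGet?_of_nonneg _ hj0]
    have hlt : j.toNat < ys.length := by omega
    rw [List.getElem?_append_left hlt]
  conv_lhs => rw [countDelDollScan]
  conv_rhs => rw [countDelDollScan]
  by_cases h1 : 1 ≤ i
  · simp only [hget i (by omega) hi, hget (i - 1) (by omega) (by omega)]
    split_ifs with h
    · exact countDelDollScan_append ys tail (i - 2) (cnt + 2) (by omega)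
    · rfl
  · rw [dif_neg (fun h => absurd h.1 h1), dif_neg (fun h => absurd h.1 h1)]
termination_by i.toNat
decreasing_by omega

theorem countDelDollLoop_eq_scan_aux (n : Nat) (bs : List Int) (hn : bs.length ≤ n) (cnt : Int) :
    countDelDollLoop bs cnt = countDelDollScan bs ((bs.length : Int) - 1) cnt := by
  induction n generalizing bs cnt with
  | zero =>
    have hlen : bs.length < 2 := by omega
    rw [countDelDollLoop, countDelDollScan]
    rw [dif_pos (Or.inl hlen), dif_neg (fun h => by omega)]
  | succ n ih =>
    by_cases hlen : bs.length < 2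
    · rw [countDelDollLoop, countDelDollScan]
      rw [dif_pos (Or.inl hlen), dif_neg (fun h => by omega)]
    · have hne : bs ≠ [] := by intro h; subst h; simp at hlen
      obtain ⟨ys', y, hy⟩ := (List.eq_nil_or_concat bs).resolve_left hne
      have hne' : ys' ≠ [] := by
        intro h; rw [hy, h] at hlen; simp at hlen
      obtain ⟨ys, x, hx⟩ := (List.eq_nil_or_concat ys').resolve_left hne'
      have hbs : bs = ys ++ [x, y] := by rw [hy, hx]; simp
      subst hbs
      have hlen' : (ys ++ [x, y]).length = ys.length + 2 := by simp
      have hys : ys.length ≤ n := by omega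
      have hlast1 : PySem.List.pyGet? (ys ++ [x, y]) (-1) = some y := by
        rw [PySem.List.pyGet?_neg_one]
        rw [show ys ++ [x, y] = (ys ++ [x]) ++ [y] from by simp]
        simp
      have hlast2 : PySem.List.pyGet? (ys ++ [x, y]) (-2) = some x := by
        rw [PySem.List.pyGet?_neg_ofNat (ys ++ [x, y]) 2 (by omega) (by simp)]
        rw [hlen', show ys.length + 2 - 2 = ys.length from by omega]
        rw [List.getElem?_append_right (by omega)]
        simp
      have hposget : PySem.List.pyGet? (ys ++ [x, y]) ((ys.length : Int) + 1) = some y := by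
        rw [PySem.List.pyGet?_of_nonneg _ (by omega)]
        rw [show ((ys.length : Int) + 1).toNat = ys.length + 1 from by omega]
        rw [List.getElem?_append_right (by omega)]
        simp
      have hposget' : PySem.List.pyGet? (ys ++ [x, y]) ((ys.length : Int)) = some x := by
        rw [PySem.List.pyGet?_of_nonneg _ (by omega)]
        rw [show ((ys.length : Int)).toNat = ys.length from by omega]
        rw [List.getElem?_append_right (by omega)]
        simp
      have hidx : (((ys ++ [x, y]).length : Int)) - 1 = (ys.length : Int) + 1 := by
        rw [hlen']; push_cast; ring
      have hdrop : (ys ++ [x, y]).dropLast.dropLast = ys := by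
        rw [show ys ++ [x, y] = (ys ++ [x]) ++ [y] from by simp]
        rw [List.dropLast_concat, List.dropLast_concat]
      rw [hidx]
      conv_lhs => rw [countDelDollLoop]
      conv_rhs => rw [countDelDollScan]
      simp only [hlast1, hlast2, hdrop,
        show ((ys.length : Int) + 1) - 1 = (ys.length : Int) from by ring,
        hposget, hposget']
      by_cases hxy : x = y
      · subst hxy
        rw [dif_neg (by simp [hlen'] : ¬ ((ys ++ [x, x]).length < 2 ∨ (some x : Option Int) ≠ some x))]
        rw [dif_pos ⟨by omega, rfl⟩]
        rw [show ((ys.length : Int) + 1) - 2 = (ys.length : Int) - 1 from by ring]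
        rw [countDelDollScan_append ys [x, x] ((ys.length : Int) - 1) (cnt + 2) (by omega)]
        exact ih ys hys (cnt + 2)
      · rw [dif_pos (Or.inr (by simpa using fun h => hxy h.symm))]
        rw [dif_neg (fun h => hxy (Option.some.inj h.2).symm)]

-- ===== VERDICT (by name: the statement is the Claim_ definition above) =====
theorem countDelDoll_spec : Claim_equal_countDelDoll := by
  intro bs _
  unfold Spec_countDelDoll countDelDoll countDelDoll_alt
  exact countDelDollLoop_eq_scan_aux bs.length bs le_rfl 0
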